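-- pv_equiv track=rewrite | github.com/alecKarfonta/graphrag | backend/gutenqa_evaluator.py | find_relevance_labels
-- ===== SOURCE A (Python) =====
-- from typing import List, Dict, Tuple, Optional
--
-- def find_relevance_labels(retrieved_chunks: List[str], gold_label: str) -> List[int]:
--     """Find which retrieved chunks contain the gold label."""
--     relevance = []
--     gold_label = gold_label.lower()
--
--     for chunk in retrieved_chunks:
--         if gold_label in chunk.lower():
--             relevance.append(1)
--             # Once we find a match, rest are 0
--             relevance.extend([0] * (len(retrieved_chunks) - len(relevance)))
--             break
--         else:
--             relevance.append(0)
--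
--     return relevance
-- ===== SOURCE B (Python) =====
-- def find_relevance_labels(retrieved_chunks, gold_label):
--     """Find which retrieved chunks contain the gold label."""
--     g = gold_label.lower()
--     mask = [g in c.lower() for c in retrieved_chunks]
--     labels = [0] * len(mask)
--     if True in mask:
--         labels[mask.index(True)] = 1
--     return labels
-- ===== Notes on version B (the rewrite author's own statement) =====
-- stated objective: alternative
-- what changed: A fuses matching and output into one short-circuiting loop that appends 1 and pads zeros at the first hit; B never short-circuits: it materialises a full boolean match mask over all chunks, allocates an all-zero label list, and sets a single 1 at mask.index(True) if any match exists.
import Mathlib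
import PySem

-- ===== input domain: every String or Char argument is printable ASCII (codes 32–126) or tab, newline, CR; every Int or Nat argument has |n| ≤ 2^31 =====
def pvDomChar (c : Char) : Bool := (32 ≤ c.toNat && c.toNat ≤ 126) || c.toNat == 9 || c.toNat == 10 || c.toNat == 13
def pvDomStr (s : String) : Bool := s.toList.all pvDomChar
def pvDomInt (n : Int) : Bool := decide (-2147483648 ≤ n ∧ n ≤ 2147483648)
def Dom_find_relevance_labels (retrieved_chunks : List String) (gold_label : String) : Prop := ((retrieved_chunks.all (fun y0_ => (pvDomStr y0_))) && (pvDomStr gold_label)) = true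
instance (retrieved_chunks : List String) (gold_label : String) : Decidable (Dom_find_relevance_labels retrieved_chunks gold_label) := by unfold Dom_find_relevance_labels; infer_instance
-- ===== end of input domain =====

-- B replaces A's short-circuiting scan-and-fill loop by a full match mask + zero allocation + one single-index assignment (objective: alternative).

-- ===== PORT A =====
-- the 'for chunk in retrieved_chunks' loop, with 'relevance' as accumulator; n = len(retrieved_chunks)
def pvLoopA (n : Nat) (gold : String) : List String → List Int → List Int
  | [], relevance => relevance
  | chunk :: rest, relevance =>
    if PySem.Str.isIn gold (PySem.Str.lower chunk) then
      -- relevance.append(1); relevance.extend([0] * (n - len(relevance))); break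
      let relevance' := relevance ++ [(1 : Int)]
      relevance' ++ List.replicate (n - relevance'.length) (0 : Int)
    else pvLoopA n gold rest (relevance ++ [(0 : Int)])

def find_relevance_labels (retrieved_chunks : List String) (gold_label : String) : List Int :=
  let gold := PySem.Str.lower gold_label
  pvLoopA retrieved_chunks.length gold retrieved_chunks []

-- ===== PORT B =====
def find_relevance_labels_alt (retrieved_chunks : List String) (gold_label : String) : List Int :=
  let g := PySem.Str.lower gold_label
  -- mask = [g in c.lower() for c in retrieved_chunks]
  let mask := retrieved_chunks.map (fun c => PySem.Str.isIn g (PySem.Str.lower c))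
  -- labels = [0] * len(mask)
  let labels := List.replicate mask.length (0 : Int)
  -- if True in mask: labels[mask.index(True)] = 1
  match PySem.List.index? mask true with
  | some i => labels.set i 1
  | none => labels

-- ===== PRECONDITION & SPEC =====
def Spec_find_relevance_labels (retrieved_chunks : List String) (gold_label : String) (out : List Int) : Prop := out = find_relevance_labels_alt retrieved_chunks gold_label
instance (retrieved_chunks : List String) (gold_label : String) (out : List Int) : Decidable (Spec_find_relevance_labels retrieved_chunks gold_label out) := by unfold Spec_find_relevance_labels; infer_instance

-- ===== CLAIM =====
def Claim_equal_find_relevance_labels : Prop := ∀ (retrieved_chunks : List String) (gold_label : String), Dom_find_relevance_labels retrieved_chunks gold_label → Spec_find_relevance_labels retrieved_chunks gold_label (find_relevance_labels retrieved_chunks gold_label)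

-- ===== LEMMAS AND PROOFS =====

-- canonical form of the result: 1 at the first match, 0 elsewhere
def pvCanon (p : String → Bool) : List String → List Int
  | [] => []
  | c :: r => if p c then (1 : Int) :: List.replicate r.length 0 else (0 : Int) :: pvCanon p r

theorem pvLoopA_eq_canon (gold : String) :
    ∀ (rest : List String) (acc : List Int) (n : Nat), n = acc.length + rest.length →
      pvLoopA n gold rest acc = acc ++ pvCanon (fun c => PySem.Str.isIn gold (PySem.Str.lower c)) rest := by
  intro rest
  induction rest with
  | nil => intro acc n h; simp [pvLoopA, pvCanon]
  | cons c r ih =>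
    intro acc n h
    by_cases hp : PySem.Str.isIn gold (PySem.Str.lower c)
    · have hlen : n - (acc.length + 1) = r.length := by
        simp [List.length_cons] at h; omega
      simp only [pvLoopA, pvCanon]
      rw [if_pos hp, if_pos hp]
      simp [hlen]
    · simp only [pvLoopA, hp, pvCanon, if_neg, Bool.false_eq_true, not_false_iff]
      rw [ih (acc ++ [(0 : Int)]) n (by simp [List.length_cons] at h ⊢; omega)]
      simp

theorem mask_eq_canon (p : String → Bool) :
    ∀ (chunks : List String),
      (match PySem.List.index? (chunks.map p) true with
       | some i => (List.replicate (chunks.map p).length (0 : Int)).set i 1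
       | none => List.replicate (chunks.map p).length (0 : Int))
      = pvCanon p chunks := by
  intro chunks
  induction chunks with
  | nil => simp [PySem.List.index?, pvCanon]
  | cons c r ih =>
    by_cases hp : p c
    · simp only [List.map_cons, hp, pvCanon, if_pos]
      rw [PySem.List.index?_cons_self]
      simp [List.replicate_succ]
    · have hne : p c ≠ true := by simp [hp]
      simp only [List.map_cons, pvCanon, hp, if_neg, Bool.false_eq_true, not_false_iff]
      rw [PySem.List.index?_cons_of_ne (v := true) (x := false) (xs := r.map p) (by simp)]
      rcases hfi : PySem.List.index? (r.map p) true with _ | j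
      · rw [hfi] at ih; simpa [List.replicate_succ] using congrArg (List.cons (0 : Int)) ih
      · rw [hfi] at ih
        simpa [List.replicate_succ, List.set] using congrArg (List.cons (0 : Int)) ih

-- ===== VERDICT =====
theorem find_relevance_labels_spec : Claim_equal_find_relevance_labels := by
  intro chunks gold _
  unfold Spec_find_relevance_labels find_relevance_labels find_relevance_labels_alt
  rw [pvLoopA_eq_canon _ _ _ _ (by simp)]
  simp only [List.nil_append]
  exact (mask_eq_canon _ chunks).symm
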